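-- pv_equiv track=rewrite | github.com/SauersML/ferromic | stats/phewas_repl.py | norm_label
-- ===== SOURCE A (Python) =====
-- def norm_label(s: str) -> str:
--     """
--     Normalize phenotype strings so label styles match between
--     ferromic 'Phenotype' and PheTK 'phecode_string'.
--
--     Examples:
--       'Melanocytic_nevi' -> 'melanocytic_nevi'
--       'Melanocytic nevi' -> 'melanocytic_nevi'
--     """
--     s = s.strip().lower()
--     out = []
--     prev_us = False
--     for ch in s:
--         if ch.isalnum():
--             out.append(ch)
--             prev_us = False
--         else:
--             if not prev_us:
--                 out.append("_")
--                 prev_us = True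
--     return "".join(out).strip("_")
-- ===== SOURCE B (Python) =====
-- def norm_label(s: str) -> str:
--     """
--     Normalize phenotype strings: tokenize into maximal alphanumeric runs
--     and join them with single underscores.
--     """
--     s = s.strip().lower()
--     tokens = []
--     i = 0
--     n = len(s)
--     while i < n:
--         if s[i].isalnum():
--             j = i
--             while j < n and s[j].isalnum():
--                 j += 1
--             tokens.append(s[i:j])
--             i = j
--         else:
--             i += 1
--     return "_".join(tokens)
-- ===== Notes on version B (the rewrite author's own statement) =====
-- stated objective: alternative
-- what changed: Replaced the char-by-char state machine (prev-underscore flag plus a final strip of underscores) by a tokenizer that extracts maximal alphanumeric runs and joins them with single underscores, so no separator bookkeeping or trailing strip is needed.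
import Mathlib
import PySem

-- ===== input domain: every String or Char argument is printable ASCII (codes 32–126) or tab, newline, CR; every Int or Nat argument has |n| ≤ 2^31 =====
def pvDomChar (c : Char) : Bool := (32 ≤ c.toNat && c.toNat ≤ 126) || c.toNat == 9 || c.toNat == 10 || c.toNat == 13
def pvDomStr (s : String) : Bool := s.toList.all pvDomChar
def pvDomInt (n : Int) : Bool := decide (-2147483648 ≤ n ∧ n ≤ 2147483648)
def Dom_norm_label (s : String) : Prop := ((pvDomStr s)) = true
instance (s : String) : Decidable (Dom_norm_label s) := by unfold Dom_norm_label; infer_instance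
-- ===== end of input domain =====

-- B replaces A's prev-underscore state machine + final strip('_') by
-- tokenize-into-maximal-alnum-runs then '_'-join (alternative decomposition, same cost).

-- ===== PORT A =====
-- the for-loop over characters with state (out, prev_us), then "".join + strip("_")
def norm_label (s : String) : String :=
  let t := PySem.Str.lower (PySem.Str.strip s)
  let r := t.toList.foldl
    (fun (st : List Char × Bool) ch =>
      if PySem.Chars.isalnum ch then (st.1 ++ [ch], false)
      else if st.2 then st else (st.1 ++ ['_'], true))
    ([], false)
  PySem.Str.stripChars (String.ofList r.1) "_"

-- ===== PORT B =====
-- Source B's tokenizer: the inner while-loop extracting a maximal alnum run is takeWhile/dropWhile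
def altToks : List Char → List (List Char)
  | [] => []
  | c :: cs =>
    if PySem.Chars.isalnum c then
      (c :: cs.takeWhile PySem.Chars.isalnum) :: altToks (cs.dropWhile PySem.Chars.isalnum)
    else
      altToks cs
termination_by l => l.length
decreasing_by
  · simpa using Nat.lt_succ_of_le (List.length_dropWhile_le _ _)
  · simp

def norm_label_alt (s : String) : String :=
  let t := PySem.Str.lower (PySem.Str.strip s)
  String.ofList (List.intercalate ['_'] (altToks t.toList))

-- ===== PRECONDITION & SPEC =====
def Spec_norm_label (s : String) (out : String) : Prop := out = norm_label_alt s
instance (s : String) (out : String) : Decidable (Spec_norm_label s out) := by unfold Spec_norm_label; infer_instance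

-- ===== CLAIM (what is proved, stated in full; the proofs are below) =====
def Claim_equal_norm_label : Prop := ∀ (s : String), Dom_norm_label s → Spec_norm_label s (norm_label s)

-- ===== LEMMAS AND PROOFS =====

-- A's loop, recursively: g prev l = the characters A's loop appends when started with prev_us = prev
def g (prev : Bool) : List Char → List Char
  | [] => []
  | c :: cs =>
    if PySem.Chars.isalnum c then c :: g false cs
    else if prev then g true cs else '_' :: g true cs

lemma foldl_eq_g (l : List Char) : ∀ (acc : List Char) (prev : Bool),
    (l.foldl (fun (st : List Char × Bool) ch =>
      if PySem.Chars.isalnum ch then (st.1 ++ [ch], false)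
      else if st.2 then st else (st.1 ++ ['_'], true)) (acc, prev)).1 = acc ++ g prev l := by
  induction l with
  | nil => intro acc prev; simp [g]
  | cons c cs ih =>
    intro acc prev
    by_cases h : PySem.Chars.isalnum c
    · simp [g, h, ih]
    · by_cases hp : prev <;> simp [g, h, hp, ih]

-- trailing underscore emitted by A's loop (run with prev = true)
def tailU (l : List Char) : List Char :=
  match l.getLast? with
  | none => []
  | some c => if l.any PySem.Chars.isalnum && !(PySem.Chars.isalnum c) then ['_'] else []

lemma g_false_cons_alnum {c : Char} (cs : List Char) (h : PySem.Chars.isalnum c = true) :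
    g false (c :: cs) = g true (c :: cs) := by
  simp [g, h]

lemma g_false_cons_not {c : Char} (cs : List Char) (h : PySem.Chars.isalnum c = false) :
    g false (c :: cs) = '_' :: g true (c :: cs) := by
  simp [g, h]

lemma g_false_run (t : List Char) (ht : ∀ c ∈ t, PySem.Chars.isalnum c = true) (r : List Char) :
    g false (t ++ r) = t ++ g false r := by
  induction t with
  | nil => simp
  | cons c cs ih =>
    have hc := ht c (by simp)
    simp only [List.cons_append, g, hc, if_pos]
    simpa using ih (fun x hx => ht x (by simp [hx]))

lemma altToks_nil_iff (l : List Char) : altToks l = [] ↔ l.any PySem.Chars.isalnum = false := by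
  induction l using altToks.induct with
  | case1 => simp [altToks]
  | case2 c cs h ih => simp [altToks, h]
  | case3 c cs h ih =>
    rw [Bool.not_eq_true] at h
    simp [altToks, h, ih]

lemma altToks_mem (l : List Char) :
    ∀ tk ∈ altToks l, tk ≠ [] ∧ ∀ c ∈ tk, PySem.Chars.isalnum c = true := by
  induction l using altToks.induct with
  | case1 => simp [altToks]
  | case2 c cs h ih =>
    intro tk htk
    rw [altToks, if_pos h] at htk
    rcases List.mem_cons.mp htk with rfl | hm
    · refine ⟨by simp, ?_⟩
      intro x hx
      rcases List.mem_cons.mp hx with rfl | hx'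
      · exact h
      · exact List.mem_takeWhile_imp hx'
    · exact ih tk hm
  | case3 c cs h ih =>
    rw [Bool.not_eq_true] at h
    intro tk htk
    rw [altToks, if_neg (by simp [h])] at htk
    exact ih tk htk

lemma intercalate_cons_cons {α : Type} (sep x y : List α) (xs : List (List α)) :
    List.intercalate sep (x :: y :: xs) = x ++ sep ++ List.intercalate sep (y :: xs) := by
  simp [List.intercalate, List.intersperse]

lemma getLast?_tail_eq {c : Char} {cs : List Char} (h : cs ≠ []) :
    (c :: cs).getLast? = cs.getLast? := by
  rcases List.exists_cons_of_ne_nil h with ⟨d, ds, rfl⟩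
  simp

lemma dropWhile_eq_cons_head {p : Char → Bool} {l l' : List Char} {a : Char}
    (h : List.dropWhile p l = a :: l') : p a = false := by
  induction l with
  | nil => simp at h
  | cons b bs ih =>
    rw [List.dropWhile_cons] at h
    by_cases hb : p b
    · rw [if_pos hb] at h; exact ih h
    · rw [if_neg hb] at h
      cases h
      simpa using hb

-- the main characterization of A's loop output
lemma g_true_eq (l : List Char) :
    g true l = List.intercalate ['_'] (altToks l) ++ tailU l := by
  induction l using altToks.induct with
  | case1 => simp [g, altToks, tailU, List.intercalate]
  | case2 c cs h ih =>
    rw [altToks, if_pos h]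
    have hsplit : cs.takeWhile PySem.Chars.isalnum ++ cs.dropWhile PySem.Chars.isalnum = cs :=
      List.takeWhile_append_dropWhile
    have hgt : g true (c :: cs) =
        c :: (cs.takeWhile PySem.Chars.isalnum ++ g false (cs.dropWhile PySem.Chars.isalnum)) := by
      rw [g, if_pos h]
      conv_lhs => rw [← hsplit]
      rw [g_false_run _ (fun x hx => List.mem_takeWhile_imp hx)]
    cases hre : cs.dropWhile PySem.Chars.isalnum with
    | nil =>
      -- no non-alnum remainder: the whole string c :: cs is alphanumeric
      have hcs : cs = cs.takeWhile PySem.Chars.isalnum := by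
        conv_lhs => rw [← hsplit, hre]
        simp
      have hall : ∀ x ∈ c :: cs, PySem.Chars.isalnum x = true := by
        intro x hx
        rcases List.mem_cons.mp hx with rfl | hx'
        · exact h
        · exact List.mem_takeWhile_imp (hcs ▸ hx')
      have htail : tailU (c :: cs) = [] := by
        unfold tailU
        cases hgl : (c :: cs).getLast? with
        | none => rfl
        | some d =>
          have : PySem.Chars.isalnum d = true := hall d (List.mem_of_getLast? hgl)
          simp [this]
      have h0 : altToks ([] : List Char) = [] := by rw [altToks]
      rw [hgt, hre, htail, h0]
      simp [g, List.intercalate]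
    | cons r0 r' =>
      have hr0 : PySem.Chars.isalnum r0 = false := dropWhile_eq_cons_head hre
      have hgr : g false (r0 :: r') = '_' :: g true (r0 :: r') := g_false_cons_not r' hr0
      have hlast : (c :: cs).getLast? = (r0 :: r').getLast? := by
        conv_lhs => rw [← hsplit, hre]
        show ((c :: cs.takeWhile PySem.Chars.isalnum) ++ (r0 :: r')).getLast? = _
        rw [List.getLast?_append]
        rcases Option.isSome_iff_exists.mp
          (List.getLast?_isSome.mpr (by simp : (r0 :: r') ≠ [])) with ⟨e, he⟩
        rw [he]; rfl
      have hanyc : (c :: cs).any PySem.Chars.isalnum = true := by simp [h]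
      rw [hre] at ih
      cases hAT : altToks (r0 :: r') with
      | nil =>
        have hnone : (r0 :: r').any PySem.Chars.isalnum = false := (altToks_nil_iff _).mp hAT
        have htailr : tailU (r0 :: r') = [] := by
          unfold tailU
          cases hgl : (r0 :: r').getLast? with
          | none => rfl
          | some d => simp [hnone]
        have htailc : tailU (c :: cs) = ['_'] := by
          unfold tailU
          rw [hlast]
          cases hgl : (r0 :: r').getLast? with
          | none => simp at hgl
          | some d =>
            have hd : PySem.Chars.isalnum d = false := by
              have := List.any_eq_false.mp hnone d (List.mem_of_getLast? hgl)
              simpa using this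
            simp [hanyc, hd]
        rw [hgt, hre, hgr, ih, hAT, htailr, htailc]
        simp [List.intercalate]
      | cons x xs =>
        have hsome : (r0 :: r').any PySem.Chars.isalnum = true := by
          by_contra hc
          rw [Bool.not_eq_true] at hc
          rw [(altToks_nil_iff _).mpr hc] at hAT
          exact (List.cons_ne_nil _ _) hAT.symm
        have htaileq : tailU (c :: cs) = tailU (r0 :: r') := by
          unfold tailU
          rw [hlast]
          cases (r0 :: r').getLast? with
          | none => rfl
          | some d => simp [hanyc, hsome]
        rw [hgt, hre, hgr, ih, hAT, htaileq, intercalate_cons_cons]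
        simp
  | case3 c cs h ih =>
    rw [Bool.not_eq_true] at h
    have hg : g true (c :: cs) = g true cs := by simp [g, h]
    rw [altToks, if_neg (by simp [h]), hg, ih]
    have htaileq : tailU (c :: cs) = tailU cs := by
      cases cs with
      | nil => unfold tailU; simp [h]
      | cons d ds =>
        unfold tailU
        rw [getLast?_tail_eq (by simp)]
        cases (d :: ds).getLast? with
        | none => rfl
        | some e => simp [h]
    rw [htaileq]

-- intercalate of tokens led by a nonempty token is nonempty
lemma inter_ne_nil (y : List Char) (xs : List (List Char)) (hy : y ≠ []) :
    List.intercalate ['_'] (y :: xs) ≠ [] := by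
  cases xs with
  | nil => simpa [List.intercalate] using hy
  | cons z zs =>
    rw [intercalate_cons_cons]
    intro hc
    rcases List.append_eq_nil_iff.mp hc with ⟨h1, _⟩
    rcases List.append_eq_nil_iff.mp h1 with ⟨h2, _⟩
    exact hy h2

lemma inter_head (toks : List (List Char))
    (h : ∀ tk ∈ toks, tk ≠ [] ∧ ∀ c ∈ tk, PySem.Chars.isalnum c = true) :
    ∀ d, (List.intercalate ['_'] toks).head? = some d → PySem.Chars.isalnum d = true := by
  intro d hd
  cases toks with
  | nil => simp [List.intercalate] at hd
  | cons x xs =>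
    obtain ⟨hxne, hxall⟩ := h x (by simp)
    rcases List.exists_cons_of_ne_nil hxne with ⟨a, as, rfl⟩
    have hda : d = a := by
      cases xs with
      | nil =>
        simp [List.intercalate] at hd
        first | exact hd | exact hd.symm
      | cons y ys =>
        rw [intercalate_cons_cons] at hd
        simp at hd
        first | exact hd | exact hd.symm
    exact hda ▸ hxall a (by simp)

lemma inter_last (toks : List (List Char))
    (h : ∀ tk ∈ toks, tk ≠ [] ∧ ∀ c ∈ tk, PySem.Chars.isalnum c = true) :
    ∀ d, (List.intercalate ['_'] toks).getLast? = some d → PySem.Chars.isalnum d = true := by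
  induction toks with
  | nil => intro d hd; simp [List.intercalate] at hd
  | cons x xs ih =>
    intro d hd
    cases xs with
    | nil =>
      obtain ⟨hxne, hxall⟩ := h x (by simp)
      have hx1 : List.intercalate ['_'] [x] = x := by simp [List.intercalate]
      rw [hx1] at hd
      exact hxall d (List.mem_of_getLast? hd)
    | cons y ys =>
      obtain ⟨hyne, _⟩ := h y (by simp)
      have hne : List.intercalate ['_'] (y :: ys) ≠ [] := inter_ne_nil y ys hyne
      rw [intercalate_cons_cons, List.getLast?_append, List.getLast?_append] at hd
      rcases Option.isSome_iff_exists.mp (List.getLast?_isSome.mpr hne) with ⟨e, he⟩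
      rw [he] at hd
      simp at hd
      exact ih (fun tk htk => h tk (by simp [htk])) d (hd ▸ he)

lemma dropWhile_head_neg {p : Char → Bool} {l : List Char} {a : Char}
    (hh : l.head? = some a) (ha : p a = false) : List.dropWhile p l = l := by
  cases l with
  | nil => rfl
  | cons b bs =>
    simp at hh
    rw [List.dropWhile_cons, hh, if_neg (by simp [ha])]

-- stripping '_' from pre ++ mid ++ post, mid headed and tailed by non-underscores
lemma strip_us (pre mid post : List Char)
    (hpre : ∀ c ∈ pre, c = '_') (hpost : ∀ c ∈ post, c = '_')
    (hhead : ∀ d, mid.head? = some d → d ≠ '_')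
    (hlast : ∀ d, mid.getLast? = some d → d ≠ '_') :
    PySem.Chars.stripChars (pre ++ (mid ++ post)) ['_'] = mid := by
  show (List.dropWhile (fun c => (['_'] : List Char).contains c)
      (List.dropWhile (fun c => (['_'] : List Char).contains c)
        (pre ++ (mid ++ post))).reverse).reverse = mid
  have hp : ∀ c, (['_'] : List Char).contains c = true ↔ c = '_' := by intro c; simp
  have hdpre : List.dropWhile (fun c => (['_'] : List Char).contains c) pre = [] :=
    List.dropWhile_eq_nil_iff.mpr (fun x hx => (hp x).mpr (hpre x hx))
  rw [List.dropWhile_append, hdpre]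
  simp only [List.isEmpty_nil, if_true]
  cases mid with
  | nil =>
    have hdpost : List.dropWhile (fun c => (['_'] : List Char).contains c) post = [] :=
      List.dropWhile_eq_nil_iff.mpr (fun x hx => (hp x).mpr (hpost x hx))
    rw [List.nil_append, hdpost]
    simp
  | cons m ms =>
    have hmne : m ≠ '_' := hhead m (by simp)
    have hd1 : List.dropWhile (fun c => (['_'] : List Char).contains c) (m :: ms) = m :: ms :=
      dropWhile_head_neg (a := m) rfl (by simp [hmne])
    rw [List.dropWhile_append, hd1]
    simp only [List.isEmpty_cons, Bool.false_eq_true, if_false]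
    rw [List.reverse_append, List.dropWhile_append]
    have hdpostr : List.dropWhile (fun c => (['_'] : List Char).contains c) post.reverse = [] :=
      List.dropWhile_eq_nil_iff.mpr (fun x hx => (hp x).mpr (hpost x (by simpa using hx)))
    rw [hdpostr]
    simp only [List.isEmpty_nil, if_true]
    have hrelast : (m :: ms).reverse.head? = (m :: ms).getLast? := List.head?_reverse
    rcases Option.isSome_iff_exists.mp
      (List.getLast?_isSome.mpr (by simp : (m :: ms) ≠ [])) with ⟨e, he⟩
    have hne : (['_'] : List Char).contains e = false := by
      have := hlast e he
      simp [this]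
    rw [dropWhile_head_neg (by rw [hrelast, he]) hne, List.reverse_reverse]

lemma alnum_ne_us {d : Char} (h : PySem.Chars.isalnum d = true) : d ≠ '_' := by
  intro hc; rw [hc] at h; exact absurd h (by decide)

lemma tailU_us (l : List Char) : ∀ c ∈ tailU l, c = '_' := by
  unfold tailU
  cases l.getLast? with
  | none => simp
  | some d => split <;> simp

-- the equivalence on the character-list level
lemma strip_g_false (l : List Char) :
    PySem.Chars.stripChars (g false l) ['_'] = List.intercalate ['_'] (altToks l) := by
  cases l with
  | nil =>
    have h0 : altToks ([] : List Char) = [] := by rw [altToks]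
    rw [h0]
    simp [g, PySem.Chars.stripChars, List.intercalate]
  | cons c cs =>
    have hmem := altToks_mem (c :: cs)
    have hhead := inter_head (altToks (c :: cs)) hmem
    have hlast := inter_last (altToks (c :: cs)) hmem
    by_cases h : PySem.Chars.isalnum c = true
    · rw [g_false_cons_alnum cs h, g_true_eq]
      have := strip_us [] (List.intercalate ['_'] (altToks (c :: cs))) (tailU (c :: cs))
        (by simp) (tailU_us _)
        (fun d hd => alnum_ne_us (hhead d hd))
        (fun d hd => alnum_ne_us (hlast d hd))
      simpa using this
    · rw [g_false_cons_not cs (by simpa using h), g_true_eq]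
      have := strip_us ['_'] (List.intercalate ['_'] (altToks (c :: cs))) (tailU (c :: cs))
        (by simp) (tailU_us _)
        (fun d hd => alnum_ne_us (hhead d hd))
        (fun d hd => alnum_ne_us (hlast d hd))
      simpa using this

-- ===== VERDICT (by name: the statement is the Claim_ definition above) =====
theorem norm_label_spec : Claim_equal_norm_label := by
  intro s _
  unfold Spec_norm_label norm_label norm_label_alt
  dsimp only
  generalize (PySem.Str.lower (PySem.Str.strip s)).toList = L
  have h1 : (L.foldl (fun (st : List Char × Bool) ch =>
      if PySem.Chars.isalnum ch then (st.1 ++ [ch], false)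
      else if st.2 then st else (st.1 ++ ['_'], true)) ([], false)).1 = g false L := by
    simpa using foldl_eq_g L [] false
  rw [h1]
  refine String.toList_inj.mp ?_
  simp only [PySem.Str.toList_stripChars, String.toList_ofList]
  exact strip_g_false L
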